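-- pv_equiv track=rewrite | github.com/thegyro/fb-bday | utils.py | check_message_birthday
-- ===== SOURCE A (Python) =====
-- def check_message_birthday(message):
--     #Should write a better condition for checking whether a Facebook friend is wishing me for my birthday.The one below is rough and ugly.
--     birthday = ['bday','birthday',"b'day",'Birthday',"B'day",'day']
--     happy = ['happy','Happy','happie','HAPPY']
--
--     if message:
--         for h in happy:
--             for b in birthday:
--                 if h in message and b in message:
--                     return True
--     return False
-- ===== SOURCE B (Python) =====
-- def check_message_birthday(message):
--     # Every word in A's birthday list contains "day", so one substring test suffices.
--     if not message:
--         return False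
--     if 'day' not in message:
--         return False
--     return ('happy' in message or 'Happy' in message
--             or 'happie' in message or 'HAPPY' in message)
-- ===== Notes on version B (the rewrite author's own statement) =====
-- stated objective: simpler
-- what changed: Removes both word lists and the nested loop: since every birthday word contains 'day', the birthday side collapses to one substring test, and the happy side is an explicit early-return disjunction of four substring tests.
import Mathlib
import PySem

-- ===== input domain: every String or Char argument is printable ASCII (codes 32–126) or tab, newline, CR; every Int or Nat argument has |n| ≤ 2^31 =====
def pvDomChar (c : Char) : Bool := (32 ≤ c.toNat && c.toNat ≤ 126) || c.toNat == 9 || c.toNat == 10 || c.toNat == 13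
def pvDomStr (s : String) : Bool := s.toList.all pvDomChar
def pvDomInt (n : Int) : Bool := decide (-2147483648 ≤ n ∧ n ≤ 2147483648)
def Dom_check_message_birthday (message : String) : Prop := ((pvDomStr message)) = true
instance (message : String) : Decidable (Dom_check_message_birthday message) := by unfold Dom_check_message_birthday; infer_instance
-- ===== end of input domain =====

-- ===== PORT A =====
def check_message_birthday (message : String) : Bool :=
  let birthday := ["bday", "birthday", "b'day", "Birthday", "B'day", "day"]
  let happy := ["happy", "Happy", "happie", "HAPPY"]
  if message ≠ "" then
    -- 'for h in happy: for b in birthday: if h in message and b in message: return True' then 'return False'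
    happy.any (fun h => birthday.any (fun b => PySem.Str.isIn h message && PySem.Str.isIn b message))
  else false

-- ===== PORT B =====
-- B: no word lists and no loops — every birthday word contains "day", so one substring test
-- plus an explicit early-return disjunction of the four happy words; simpler, same values.
def check_message_birthday_alt (message : String) : Bool :=
  if message = "" then false
  else if !(PySem.Str.isIn "day" message) then false
  else PySem.Str.isIn "happy" message || PySem.Str.isIn "Happy" message
       || PySem.Str.isIn "happie" message || PySem.Str.isIn "HAPPY" message

-- ===== PRECONDITION & SPEC =====
def Spec_check_message_birthday (message : String) (out : Bool) : Prop := out = check_message_birthday_alt message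
instance (message : String) (out : Bool) : Decidable (Spec_check_message_birthday message out) := by unfold Spec_check_message_birthday; infer_instance

-- ===== CLAIM (what is proved, stated in full; the proofs are below) =====
def Claim_equal_check_message_birthday : Prop := ∀ (message : String), Dom_check_message_birthday message → Spec_check_message_birthday message (check_message_birthday message)

-- ===== LEMMAS AND PROOFS =====

-- substring containment is transitive
theorem isIn_trans (a b m : String) (h1 : PySem.Str.isIn a b = true)
    (h2 : PySem.Str.isIn b m = true) : PySem.Str.isIn a m = true := by
  rw [PySem.Str.isIn_iff_infix] at h1 h2 ⊢
  exact h1.trans h2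

-- the nested 'any' over the product factors into the conjunction of two independent 'any's
theorem any_any_and {α β : Type} (l1 : List α) (l2 : List β) (P : α → Bool) (Q : β → Bool) :
    l1.any (fun h => l2.any (fun b => P h && Q b)) = (l1.any P && l2.any Q) := by
  induction l1 with
  | nil => simp
  | cons a t ih =>
    simp only [List.any_cons, ih]
    by_cases hP : P a = true
    · simp only [hP, Bool.true_and]
      cases l2.any Q <;> simp
    · simp only [Bool.eq_false_iff.mpr hP, Bool.false_and]
      cases t.any P <;> simp

-- every word in A's birthday list contains "day", so the any collapses to one test
theorem bday_any_eq_day (m : String) :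
    (["bday", "birthday", "b'day", "Birthday", "B'day", "day"].any
      (fun b => PySem.Str.isIn b m)) = PySem.Str.isIn "day" m := by
  refine Bool.eq_iff_iff.mpr ⟨?_, ?_⟩
  · simp only [List.any_cons, List.any_nil, Bool.or_false, Bool.or_eq_true]
    rintro (h | h | h | h | h | h) <;>
      exact isIn_trans "day" _ m (by decide) h
  · intro h
    simp only [List.any_cons, List.any_nil, Bool.or_false, Bool.or_eq_true]
    exact Or.inr (Or.inr (Or.inr (Or.inr (Or.inr h))))

-- ===== VERDICT (by name: the statement is the Claim_ definition above) =====
theorem check_message_birthday_spec : Claim_equal_check_message_birthday := by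
  intro message _
  unfold Spec_check_message_birthday check_message_birthday check_message_birthday_alt
  by_cases h : message = ""
  · simp [h]
  · simp only [h, ne_eq, not_false_eq_true, if_true, if_false]
    rw [any_any_and, bday_any_eq_day]
    cases hd : PySem.Str.isIn "day" message <;>
      simp [List.any_cons, List.any_nil, Bool.or_assoc]
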